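-- pv_equiv track=rewrite | github.com/Tosaaaki/QuantRabbit | analysis/replay_quality_gate_worker.py | _normalize_hours
-- ===== SOURCE A (Python) =====
-- from typing import Any, Callable
--
-- def _safe_int(value: Any, default: int = 0) -> int:
--     try:
--         return int(float(value))
--     except Exception:
--         return int(default)
--
-- def _normalize_hours(raw: Any) -> list[int]:
--     if not isinstance(raw, list):
--         return []
--     out: list[int] = []
--     for value in raw:
--         hour = _safe_int(value, default=-1)
--         if 0 <= hour <= 23 and hour not in out:
--             out.append(hour)
--     out.sort()
--     return out
-- ===== SOURCE B (Python) =====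
-- from typing import Any
--
-- def _safe_int(value: Any, default: int = 0) -> int:
--     try:
--         return int(float(value))
--     except Exception:
--         return int(default)
--
-- def _normalize_hours(raw: Any) -> list[int]:
--     if not isinstance(raw, list):
--         return []
--     seen = [False] * 24
--     for value in raw:
--         hour = _safe_int(value, default=-1)
--         if 0 <= hour <= 23:
--             seen[hour] = True
--     return [h for h in range(24) if seen[h]]
-- ===== Notes on version B (the rewrite author's own statement) =====
-- stated objective: simpler
-- what changed: Replaces the membership-scan dedup list plus final sort with a fixed 24-slot presence array indexed by hour, emitted in order by a range comprehension (no sort, no inner scan).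
import Mathlib
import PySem

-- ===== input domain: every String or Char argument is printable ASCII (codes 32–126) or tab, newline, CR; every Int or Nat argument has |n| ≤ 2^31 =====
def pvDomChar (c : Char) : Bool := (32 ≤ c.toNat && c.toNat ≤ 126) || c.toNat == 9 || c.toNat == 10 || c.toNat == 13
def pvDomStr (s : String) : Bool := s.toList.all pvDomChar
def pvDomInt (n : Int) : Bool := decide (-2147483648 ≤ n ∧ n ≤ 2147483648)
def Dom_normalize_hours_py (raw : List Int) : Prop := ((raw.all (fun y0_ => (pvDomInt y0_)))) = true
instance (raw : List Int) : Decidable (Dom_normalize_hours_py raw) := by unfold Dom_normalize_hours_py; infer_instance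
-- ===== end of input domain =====

-- B replaces A's membership-scan dedup list and final sort by a 24-slot presence array read out in index order; equivalence is about the return value.

-- ===== PORT A =====
-- _safe_int(value, default) on an Int argument: int(float(value)) = value exactly (|value| ≤ 2^31 < 2^53, so float is exact); the except branch is unreachable.
def safe_int (value : Int) (default : Int) : Int := value

def stepA (out : List Int) (value : Int) : List Int :=
  let hour := safe_int value (-1)
  if 0 ≤ hour ∧ hour ≤ 23 ∧ hour ∉ out then out ++ [hour] else out

def normalize_hours_py (raw : List Int) : List Int :=
  let out := raw.foldl stepA []
  PySem.List.sorted out (fun x => x) false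

-- ===== PORT B =====
def stepB (seen : List Bool) (value : Int) : List Bool :=
  let hour := safe_int value (-1)
  if 0 ≤ hour ∧ hour ≤ 23 then seen.set hour.toNat true else seen

def normalize_hours_py_alt (raw : List Int) : List Int :=
  let seen := raw.foldl stepB (List.replicate 24 false)
  (PySem.List.pyRange 0 24 1).filter (fun h => seen.getD h.toNat false)

-- ===== PRECONDITION & SPEC =====
def Spec_normalize_hours_py (raw : List Int) (out : List Int) : Prop := out = normalize_hours_py_alt raw
instance (raw : List Int) (out : List Int) : Decidable (Spec_normalize_hours_py raw out) := by unfold Spec_normalize_hours_py; infer_instance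

-- ===== CLAIM (what is proved, stated in full; the proofs are below) =====
def Claim_equal_normalize_hours_py : Prop := ∀ (raw : List Int), Dom_normalize_hours_py raw → Spec_normalize_hours_py raw (normalize_hours_py raw)

-- ===== LEMMAS AND PROOFS =====

-- invariant linking A's dedup list to B's presence array
def HourInv (out : List Int) (seen : List Bool) : Prop :=
  seen.length = 24 ∧ out.Nodup ∧ (∀ h ∈ out, 0 ≤ h ∧ h ≤ 23) ∧
  (∀ k, k < 24 → seen.getD k false = decide ((k : Int) ∈ out))

lemma inv_step (out : List Int) (seen : List Bool) (v : Int) (h : HourInv out seen) :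
    HourInv (stepA out v) (stepB seen v) := by
  obtain ⟨hlen, hnd, hbd, hmem⟩ := h
  unfold stepA stepB safe_int
  by_cases hg : 0 ≤ v ∧ v ≤ 23
  · by_cases hin : v ∈ out
    · simp only [hg.1, hg.2, hin, and_true, not_true_eq_false, and_false, if_false,
        if_true]
      refine ⟨by simp [hlen], hnd, hbd, ?_⟩
      intro k hk
      by_cases hkv : k = v.toNat
      · subst hkv
        have : seen.getD v.toNat false = decide ((v.toNat : Int) ∈ out) := hmem _ (by omega)
        rw [List.getD_eq_getElem?_getD, List.getElem?_set_self (by omega), Option.getD_some]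
        simp [Int.toNat_of_nonneg hg.1, hin]
      · rw [List.getD_eq_getElem?_getD, List.getElem?_set_ne (by omega),
          ← List.getD_eq_getElem?_getD]
        exact hmem k hk
    · simp only [hg.1, hg.2, hin, not_false_eq_true, and_true, if_true]
      refine ⟨by simp [hlen], ?_, ?_, ?_⟩
      · rw [List.nodup_append]
        refine ⟨hnd, List.nodup_singleton _, ?_⟩
        intro a ha b hb
        have hbv : b = v := by simpa using hb
        subst hbv
        intro he
        exact hin (he ▸ ha)
      · intro h hh
        rcases List.mem_append.1 hh with h1 | h1
        · exact hbd h h1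
        · simp at h1; omega
      · intro k hk
        by_cases hkv : k = v.toNat
        · subst hkv
          rw [List.getD_eq_getElem?_getD, List.getElem?_set_self (by omega), Option.getD_some]
          simp [Int.toNat_of_nonneg hg.1]
        · rw [List.getD_eq_getElem?_getD, List.getElem?_set_ne (by omega),
            ← List.getD_eq_getElem?_getD, hmem k hk]
          have : (k : Int) ≠ v := by
            intro he; apply hkv; omega
          simp [this]
  · simp only [hg]
    have : ¬ (0 ≤ v ∧ v ≤ 23 ∧ v ∉ out) := by tauto
    rw [if_neg this]
    exact ⟨hlen, hnd, hbd, hmem⟩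

lemma inv_fold (raw : List Int) (out : List Int) (seen : List Bool) (h : HourInv out seen) :
    HourInv (raw.foldl stepA out) (raw.foldl stepB seen) := by
  induction raw generalizing out seen with
  | nil => exact h
  | cons v t ih => exact ih _ _ (inv_step _ _ _ h)

lemma inv_init : HourInv [] (List.replicate 24 false) := by
  refine ⟨by simp, List.nodup_nil, by simp, ?_⟩
  intro k hk
  rw [List.getD_eq_getElem?_getD, List.getElem?_replicate]
  simp [hk]

lemma final_eq (out : List Int) (seen : List Bool) (h : HourInv out seen) :
    PySem.List.sorted out (fun x => x) false =
      (PySem.List.pyRange 0 24 1).filter (fun h => seen.getD h.toNat false) := by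
  obtain ⟨hlen, hnd, hbd, hmem⟩ := h
  have hfc : (PySem.List.pyRange 0 24 1).filter (fun h => seen.getD h.toNat false) =
      (PySem.List.pyRange 0 24 1).filter (fun h => decide (h ∈ out)) := by
    apply List.filter_congr
    intro x hx
    have hx' := (PySem.List.mem_pyRange_one).1 hx
    have hlt : x.toNat < 24 := by omega
    have := hmem x.toNat hlt
    rw [Int.toNat_of_nonneg hx'.1] at this
    simpa using this
  rw [hfc]
  apply PySem.List.sorted_eq_of_perm_of_pairwise_lt
  · rw [List.perm_ext_iff_of_nodup (List.Nodup.filter _ (PySem.List.nodup_pyRange_one 0 24)) hnd]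
    intro a
    simp only [List.mem_filter, decide_eq_true_eq, PySem.List.mem_pyRange_one]
    constructor
    · rintro ⟨_, ha⟩; exact ha
    · intro ha
      have := hbd a ha
      exact ⟨⟨this.1, by omega⟩, ha⟩
  · exact List.Pairwise.filter _ (PySem.List.pairwise_lt_pyRange_one 0 24)

-- ===== VERDICT (by name: the statement is the Claim_ definition above) =====
theorem normalize_hours_py_spec : Claim_equal_normalize_hours_py := by
  intro raw _
  unfold Spec_normalize_hours_py normalize_hours_py normalize_hours_py_alt
  exact final_eq _ _ (inv_fold raw [] (List.replicate 24 false) inv_init)
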